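-- pv_equiv track=rewrite | github.com/ZL-KA/IWSLT25-low-resource-KIT | format_utilities.py | combine_lists
-- ===== SOURCE A (Python) =====
-- def combine_lists(lists, n_values):
--     assert len(lists) == len(n_values)
--     splitted_lists = []
--     nr_chunks = None
--     for l, n in zip(lists, n_values):
--         assert len(l) % n == 0
--         chunked = [l[i:i + n] for i in range(0, len(l), n)]
--         splitted_lists.append(chunked)
--         if nr_chunks is None:
--             nr_chunks = len(chunked)
--         else:
--             assert nr_chunks == len(chunked)
--     combined = []
--     for chunk_i in range(nr_chunks):
--         for splitted_list in splitted_lists: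
--             combined.extend(splitted_list[chunk_i])
--     return combined
-- ===== SOURCE B (Python) =====
-- def combine_lists(lists, n_values):
--     assert len(lists) == len(n_values) and lists
--     buckets = None
--     for l, n in zip(lists, n_values):
--         assert n > 0 and len(l) % n == 0
--         nr = len(l) // n
--         if buckets is None:
--             buckets = [[] for _ in range(nr)]
--         assert nr == len(buckets)
--         for k in range(nr):
--             buckets[k].extend(l[k * n : (k + 1) * n])
--     out = []
--     for b in buckets:
--         out.extend(b)
--     return out
-- ===== Notes on version B (the rewrite author's own statement) =====
-- stated objective: alternative
-- what changed: B transposes in a single pass over the input lists, appending each list's k-th chunk into per-chunk buckets and flattening the buckets at the end, instead of A's two stages (materialize every list's chunk list, then read them chunk-major); Pre_ excludes mismatched lengths, empty input, n == 0 / non-dividing n and unequal chunk counts (A raises there) and non-positive chunk sizes, where A's empty result is an accident of range() with a negative step and B validates n > 0.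
-- outside the precondition, e.g. on combine_lists([[1, 2]], [-2]): A returns [], B raises AssertionError
import Mathlib
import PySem

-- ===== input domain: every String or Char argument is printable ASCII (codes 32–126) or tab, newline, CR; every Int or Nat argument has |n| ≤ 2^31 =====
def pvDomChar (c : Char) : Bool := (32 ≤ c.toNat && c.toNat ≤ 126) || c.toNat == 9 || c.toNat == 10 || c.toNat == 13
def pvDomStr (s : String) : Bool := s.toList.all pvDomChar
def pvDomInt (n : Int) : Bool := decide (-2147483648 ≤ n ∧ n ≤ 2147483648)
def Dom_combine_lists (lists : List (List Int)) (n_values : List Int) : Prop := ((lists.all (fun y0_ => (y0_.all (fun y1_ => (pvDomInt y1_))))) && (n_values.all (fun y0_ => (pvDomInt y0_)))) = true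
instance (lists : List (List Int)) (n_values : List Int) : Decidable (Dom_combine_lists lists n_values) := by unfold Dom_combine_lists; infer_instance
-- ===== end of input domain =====

-- B transposes in one pass over the lists, writing each list's chunks into per-chunk
-- buckets and flattening them at the end; A's intermediate list-of-chunk-lists and its
-- chunk-major read loop disappear (objective: alternative, same cost).

-- ===== PORT A =====
-- chunked = [l[i:i + n] for i in range(0, len(l), n)]
def pvChunksA (l : List Int) (n : Int) : List (List Int) :=
  (PySem.List.pyRange 0 (PySem.List.len l) n).map
    (fun i => PySem.List.slice l (some i) (some (i + n)))

-- one iteration of A's first loop: append chunked; set nr_chunks on the first pass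
def pvStepA (st : List (List (List Int)) × Option Int) (p : List Int × Int) :
    List (List (List Int)) × Option Int :=
  let chunked := pvChunksA p.1 p.2
  (st.1 ++ [chunked],
    match st.2 with
    | none => some ((chunked.length : Int))
    | some k => some k)

def combine_lists (lists : List (List Int)) (n_values : List Int) : List Int :=
  let st := (lists.zip n_values).foldl pvStepA ([], none)
  match st.2 with
  | none => []   -- Python: range(None) raises TypeError here (lists == []); excluded by Pre_
  | some k =>
    (PySem.List.pyRange 0 k 1).foldl
      (fun combined ci =>
        st.1.foldl (fun c sl => c ++ PySem.List.pyGetD sl ci []) combined) []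

-- ===== PORT B =====
-- l[k*n : (k+1)*n]
def pvChunkB (p : List Int × Int) (k : Int) : List Int :=
  PySem.List.slice p.1 (some (k * p.2)) (some ((k + 1) * p.2))

-- one iteration of B's loop: create the buckets on the first pass, then extend bucket k
-- with the list's k-th chunk (the in-place 'for k in range(nr): buckets[k].extend(...)'
-- is the index-wise update mapIdx)
def pvStepB (st : Option (List (List Int))) (p : List Int × Int) :
    Option (List (List Int)) :=
  let nr := PySem.Int.floordiv (PySem.List.len p.1) p.2
  let bs := match st with
    | none => List.replicate nr.toNat ([] : List Int)
    | some bs => bs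
  some (bs.mapIdx (fun k b => b ++ pvChunkB p (k : Int)))

def combine_lists_alt (lists : List (List Int)) (n_values : List Int) : List Int :=
  match (lists.zip n_values).foldl pvStepB none with
  | none => []   -- Python B: the leading assert rejects lists == []; excluded by Pre_
  | some bs => bs.foldl (fun out b => out ++ b) []

-- ===== PRECONDITION & SPEC =====
-- per-pair chunk count for positive n
def pvCnt (p : List Int × Int) : Int := (p.1.length : Int) / p.2

-- Excluded: mismatched lengths, lists == [], n with len(l) % n != 0 and unequal chunk
-- counts (A raises AssertionError / TypeError / ZeroDivisionError there), and
-- non-positive n, where A's empty result is an accident of range() with a negative step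
-- (B validates n > 0 and raises).
def Pre_combine_lists (lists : List (List Int)) (n_values : List Int) : Prop :=
  lists.length = n_values.length ∧ lists ≠ [] ∧
  ∀ p ∈ lists.zip n_values,
    0 < p.2 ∧ PySem.Int.mod (p.1.length : Int) p.2 = 0 ∧
    pvCnt p = pvCnt ((lists.zip n_values).headD ([], 1))
instance (lists : List (List Int)) (n_values : List Int) : Decidable (Pre_combine_lists lists n_values) := by unfold Pre_combine_lists; infer_instance

def pvWitness_combine_lists : List (List Int) × List Int := ([[1, 2], [3, 4, 5, 6]], [1, 2])

def Spec_combine_lists (lists : List (List Int)) (n_values : List Int) (out : List Int) : Prop := out = combine_lists_alt lists n_values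
instance (lists : List (List Int)) (n_values : List Int) (out : List Int) : Decidable (Spec_combine_lists lists n_values out) := by unfold Spec_combine_lists; infer_instance

-- ===== CLAIM (what is proved, stated in full; the proofs are below) =====
def Claim_equal_combine_lists : Prop := ∀ (lists : List (List Int)) (n_values : List Int), Dom_combine_lists lists n_values → Pre_combine_lists lists n_values → Spec_combine_lists lists n_values (combine_lists lists n_values)

-- ===== LEMMAS AND PROOFS =====

-- A's first loop once nr_chunks is set: it only appends chunked lists
theorem pv_foldA_some (zs : List (List Int × Int)) (acc : List (List (List Int))) (k : Int) :
    zs.foldl pvStepA (acc, some k) =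
      (acc ++ zs.map (fun p => pvChunksA p.1 p.2), some k) := by
  induction zs generalizing acc with
  | nil => simp
  | cons z rest ih => simp [pvStepA, ih]

-- the number of chunks A builds from (l, n) is the closed form len/n (n > 0, n ∣ len)
theorem pv_chunksA_length (l : List Int) (n : Int) (hpos : 0 < n)
    (hmod : PySem.Int.mod (l.length : Int) n = 0) :
    ((pvChunksA l n).length : Int) = pvCnt (l, n) := by
  obtain ⟨q, hq⟩ := (PySem.Int.mod_eq_zero_iff_dvd _ _).mp hmod
  have hnn : (0:Int) ≤ (l.length : Int) := by positivity
  have hq0 : 0 ≤ q := by nlinarith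
  simp only [pvChunksA, pvCnt, PySem.List.len_eq, List.length_map,
    PySem.List.pyRange_of_pos _ _ hpos, List.length_range]
  by_cases hl : (0:Int) < (l.length : Int)
  · rw [if_pos hl]
    have hdiv : ((l.length : Int) - 0 + n - 1) / n = q := by
      rw [show ((l.length : Int) - 0 + n - 1) = (n - 1) + q * n by rw [hq]; ring,
        Int.add_mul_ediv_right _ _ (by omega),
        Int.ediv_eq_zero_of_lt (by omega) (by omega)]
      omega
    rw [hdiv, hq, Int.mul_ediv_cancel_left _ (by omega)]
    omega
  · rw [if_neg hl]
    have : (l.length : Int) = 0 := by omega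
    rw [this]
    simp

-- indexing A's chunked list is the direct slice B takes
theorem pv_chunksA_get (l : List Int) (n : Int) (ci : Int) (hpos : 0 < n)
    (h0 : 0 ≤ ci) (hlt : ci < ((pvChunksA l n).length : Int)) :
    PySem.List.pyGetD (pvChunksA l n) ci [] = pvChunkB (l, n) ci := by
  have hform : pvChunksA l n =
      (List.range (if 0 < ((l.length : Int)) then ((((l.length : Int)) - 0 + n - 1) / n).toNat else 0)).map
        (fun (k : Nat) => PySem.List.slice l (some (0 + n * (k : Int))) (some (0 + n * (k : Int) + n))) := by
    simp only [pvChunksA, PySem.List.len_eq, PySem.List.pyRange_of_pos _ _ hpos, List.map_map]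
    rfl
  rw [hform] at hlt ⊢
  rw [PySem.List.pyGetD_eq_getElem _ _ h0 (by exact_mod_cast hlt)]
  have hci : ci.toNat < (if 0 < ((l.length : Int)) then ((((l.length : Int)) - 0 + n - 1) / n).toNat else 0) := by
    rw [List.length_map, List.length_range] at hlt
    omega
  rw [List.getElem_map, List.getElem_range]
  rw [Int.toNat_of_nonneg h0]
  simp only [pvChunkB]
  congr 2 <;> ring

-- B's loop after the buckets exist: bucket k accumulates each remaining list's k-th chunk
theorem pv_foldB_some (zs : List (List Int × Int)) (bs : List (List Int)) :
    zs.foldl pvStepB (some bs) =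
      some ((List.range bs.length).map
        (fun k => bs.getD k [] ++ zs.flatMap (fun p => pvChunkB p (k : Int)))) := by
  induction zs generalizing bs with
  | nil =>
    simp only [List.foldl_nil, List.flatMap_nil, List.append_nil, Option.some.injEq]
    apply List.ext_getElem
    · simp
    · intro i h1 h2
      simp [List.getD_eq_getElem?_getD, List.getElem?_eq_getElem (by simpa using h2)]
  | cons z rest ih =>
    rw [List.foldl_cons, show pvStepB (some bs) z =
        some (bs.mapIdx (fun k b => b ++ pvChunkB z (k : Int))) from rfl, ih]
    simp only [List.length_mapIdx, Option.some.injEq]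
    apply List.map_congr_left
    intro k hk
    rw [List.mem_range] at hk
    rw [List.getD_eq_getElem?_getD, List.getElem?_eq_getElem (by simpa using hk),
      List.getElem_mapIdx, List.getD_eq_getElem?_getD,
      List.getElem?_eq_getElem (by simpa using hk)]
    simp [List.append_assoc]

-- the double extend loop of A is a double flatMap
theorem pv_loops_flat (R : List Int) (S : List (List (List Int))) :
    R.foldl (fun combined ci =>
        S.foldl (fun c sl => c ++ PySem.List.pyGetD sl ci ([] : List Int)) combined) [] =
      R.flatMap (fun ci => S.flatMap (fun sl => PySem.List.pyGetD sl ci [])) := by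
  simp only [PySem.List.foldl_append_eq_flatMap, List.nil_append]

-- ===== VERDICT (by name: the statement is the Claim_ definition above) =====
theorem combine_lists_spec : Claim_equal_combine_lists := by
  intro lists n_values _ hpre
  obtain ⟨hlen, hne, hall⟩ := hpre
  unfold Spec_combine_lists combine_lists combine_lists_alt
  rcases hz : lists.zip n_values with _ | ⟨z, rest⟩
  · exfalso
    have hzl := congrArg List.length hz
    simp [List.length_zip] at hzl
    rcases hzl with h | h
    · exact hne h
    · exact hne (List.eq_nil_of_length_eq_zero (by rw [hlen, h]; rfl))
  · rw [hz] at hall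
    have hz0 : z ∈ z :: rest := List.mem_cons_self
    obtain ⟨hpos0, hmod0, _⟩ := hall z hz0
    have hk0 : ((pvChunksA z.1 z.2).length : Int) = pvCnt z :=
      pv_chunksA_length z.1 z.2 hpos0 hmod0
    -- evaluate A's first loop
    rw [List.foldl_cons, show pvStepA ([], none) z =
        ([pvChunksA z.1 z.2], some ((pvChunksA z.1 z.2).length : Int)) from rfl,
      pv_foldA_some]
    simp only
    rw [pv_loops_flat]
    -- evaluate B's loop: first step creates the buckets, pv_foldB_some does the rest
    have hnr : (PySem.Int.floordiv (PySem.List.len z.1) z.2) = pvCnt z := by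
      rw [PySem.List.len_eq, PySem.Int.floordiv_eq_ediv_of_pos hpos0]; rfl
    rw [List.foldl_cons, show pvStepB none z =
        some ((List.replicate (PySem.Int.floordiv (PySem.List.len z.1) z.2).toNat
          ([] : List Int)).mapIdx (fun k b => b ++ pvChunkB z (k : Int))) from rfl,
      pv_foldB_some]
    simp only [List.length_mapIdx, List.length_replicate, hnr,
      PySem.List.foldl_append_eq_flatten, List.nil_append, ← List.flatMap_def]
    -- both sides are a flatMap over the same chunk indices
    have hcnt : (pvCnt z).toNat = (pvChunksA z.1 z.2).length := by omega
    rw [hcnt, PySem.List.pyRange_zero_natCast, List.flatMap_map]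
    apply List.flatMap_congr
    intro k hk
    rw [List.mem_range] at hk
    have hkI : ((k : Int)) < ((pvChunksA z.1 z.2).length : Int) := by exact_mod_cast hk
    -- B's bucket k starts as z's k-th chunk
    have hbucket : ((List.replicate (pvChunksA z.1 z.2).length ([] : List Int)).mapIdx
        (fun j b => b ++ pvChunkB z (j : Int))).getD k [] = pvChunkB z (k : Int) := by
      rw [List.getD_eq_getElem?_getD,
        List.getElem?_eq_getElem (by simpa using hk), List.getElem_mapIdx]
      simp
    rw [hbucket, show pvChunkB z (k : Int) ++ rest.flatMap (fun p => pvChunkB p (k : Int)) =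
        (z :: rest).flatMap (fun p => pvChunkB p (k : Int)) by rw [List.flatMap_cons],
      show ([pvChunksA z.1 z.2] ++ rest.map fun p => pvChunksA p.1 p.2) =
        (z :: rest).map (fun p => pvChunksA p.1 p.2) by simp, List.flatMap_map]
    apply List.flatMap_congr
    intro p hp
    obtain ⟨hposp, hmodp, hcp⟩ := hall p hp
    obtain ⟨_, _, hcz⟩ := hall z hz0
    have hlenp : ((pvChunksA p.1 p.2).length : Int) = ((pvChunksA z.1 z.2).length : Int) := by
      rw [pv_chunksA_length p.1 p.2 hposp hmodp, hk0, hcp, hcz]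
    exact pv_chunksA_get p.1 p.2 (k : Int) hposp (by positivity) (by omega)
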